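-- pv_equiv track=rewrite | github.com/laios1/brainfuck_encodder | brainfuck_encoder.py | rajouter_les_fleches
-- ===== SOURCE A (Python) =====
-- def rajouter_les_fleches(nb):
--     mychr = ""
--     while nb != 0 :
--         if nb > 0 :
--             nb = nb-1
--             mychr += "<"
--         if nb < 0 :
--             nb = nb+1
--             mychr += ">"
--     return mychr
-- ===== SOURCE B (Python) =====
-- def rajouter_les_fleches(nb):
--     if nb > 0:
--         return "<" * nb
--     return ">" * (-nb)
-- ===== Notes on version B (the rewrite author's own statement) =====
-- stated objective: simpler
-- what changed: Replaces the decrementing while-loop that appends one character per iteration with a closed-form string repetition chosen by the sign of nb.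
import Mathlib
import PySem

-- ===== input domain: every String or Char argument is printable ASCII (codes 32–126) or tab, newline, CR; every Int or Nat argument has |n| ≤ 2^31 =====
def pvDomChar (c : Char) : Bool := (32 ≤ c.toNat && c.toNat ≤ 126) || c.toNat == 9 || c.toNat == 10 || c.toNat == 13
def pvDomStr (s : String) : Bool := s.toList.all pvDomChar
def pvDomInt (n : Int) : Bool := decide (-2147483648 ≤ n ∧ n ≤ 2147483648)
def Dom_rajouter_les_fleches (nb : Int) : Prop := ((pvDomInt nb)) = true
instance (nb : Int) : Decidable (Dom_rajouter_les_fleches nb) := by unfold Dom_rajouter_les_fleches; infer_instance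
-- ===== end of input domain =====

-- B replaces A's decrementing while-loop with a closed-form sign-based repetition (simpler).


-- ===== PORT A =====
-- A's while-loop; the two `if`s of the body are mutually exclusive (after `nb = nb-1`
-- with nb > 0 we have nb ≥ 0), so the body appends exactly one character per iteration.
def pvLoopA (nb : Int) (mychr : List Char) : List Char :=
  if nb = 0 then mychr
  else if nb > 0 then pvLoopA (nb - 1) (mychr ++ ['<'])
  else pvLoopA (nb + 1) (mychr ++ ['>'])
termination_by nb.natAbs
decreasing_by all_goals omega

def rajouter_les_fleches (nb : Int) : String := String.ofList (pvLoopA nb [])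

-- ===== PORT B =====
def rajouter_les_fleches_alt (nb : Int) : String :=
  if nb > 0 then String.ofList (List.replicate nb.toNat '<')
  else String.ofList (List.replicate (-nb).toNat '>')

-- ===== PRECONDITION & SPEC =====
def Spec_rajouter_les_fleches (nb : Int) (out : String) : Prop := out = rajouter_les_fleches_alt nb
instance (nb : Int) (out : String) : Decidable (Spec_rajouter_les_fleches nb out) := by unfold Spec_rajouter_les_fleches; infer_instance

-- ===== CLAIM (what is proved, stated in full; the proofs are below) =====
def Claim_equal_rajouter_les_fleches : Prop := ∀ (nb : Int), Dom_rajouter_les_fleches nb → Spec_rajouter_les_fleches nb (rajouter_les_fleches nb)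

-- ===== LEMMAS AND PROOFS =====
theorem pvLoopA_closed (n : Nat) : ∀ (nb : Int), nb.natAbs = n → ∀ (s : List Char),
    pvLoopA nb s = s ++ (if nb > 0 then List.replicate nb.toNat '<' else List.replicate (-nb).toNat '>') := by
  induction n with
  | zero =>
    intro nb h s
    have hz : nb = 0 := by omega
    subst hz
    simp [pvLoopA]
  | succ k ih =>
    intro nb h s
    rw [pvLoopA]
    by_cases h0 : nb = 0
    · omega
    · simp only [h0, if_false]
      by_cases hp : nb > 0
      · simp only [hp, if_true]
        rw [ih (nb - 1) (by omega)]
        by_cases hp1 : nb - 1 > 0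
        · simp only [hp1, if_true, List.append_assoc]
          congr 1
          have : nb.toNat = (nb - 1).toNat + 1 := by omega
          rw [this, List.replicate_succ]
          simp
        · have hnb1 : nb = 1 := by omega
          subst hnb1
          simp
      · simp only [hp, if_false]
        rw [ih (nb + 1) (by omega)]
        have hneg : nb < 0 := by omega
        by_cases hq : nb + 1 > 0
        · have hnb1 : nb = -1 := by omega
          subst hnb1
          simp
        · simp only [hq, if_false, List.append_assoc]
          congr 1
          have : (-nb).toNat = (-(nb + 1)).toNat + 1 := by omega
          rw [this, List.replicate_succ]
          simp

-- ===== VERDICT (by name: the statement is the Claim_ definition above) =====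
theorem rajouter_les_fleches_spec : Claim_equal_rajouter_les_fleches := by
  intro nb _
  unfold Spec_rajouter_les_fleches rajouter_les_fleches rajouter_les_fleches_alt
  rw [pvLoopA_closed nb.natAbs nb rfl []]
  by_cases hp : nb > 0 <;> simp [hp]
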